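-- pv_equiv track=rewrite | github.com/Svinte/Wordle-Solver | src/_score.py | green_frequency
-- ===== SOURCE A (Python) =====
-- from collections import Counter
--
-- def green_frequency(words):
--     """
--     Optimized: counts letters that esiintyy samoilla paikoilla muiden sanojen kanssa.
--     Returns dict {word: score}.
--     """
--     word_len = len(words[0])
--     scores = {w: 0 for w in words}
--
--     for i in range(word_len):
--         column_counts = Counter(word[i] for word in words)
--         for word in words:
--             scores[word] += column_counts[word[i]] - 1
--
--     return scores
-- ===== SOURCE B (Python) =====
-- def green_frequency(words):
--     # Pairwise comparison: a word's score is its total number of same-position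
--     # letter matches against all words (self included), minus word_len per occurrence.
--     word_len = len(words[0])
--     scores = {}
--     for w in words:
--         matches = sum(v[i] == w[i] for v in words for i in range(word_len))
--         scores[w] = scores.get(w, 0) + matches - word_len
--     return scores
-- ===== Notes on version B (the rewrite author's own statement) =====
-- stated objective: alternative
-- what changed: Drops the frequency Counters entirely: each word's score is computed by direct pairwise comparison, as its total number of same-position letter matches against every word in the list minus word_len per occurrence (score identity sum_i (count_i[w[i]]-1) = sum_v matches(w,v) - L).
import Mathlib
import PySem

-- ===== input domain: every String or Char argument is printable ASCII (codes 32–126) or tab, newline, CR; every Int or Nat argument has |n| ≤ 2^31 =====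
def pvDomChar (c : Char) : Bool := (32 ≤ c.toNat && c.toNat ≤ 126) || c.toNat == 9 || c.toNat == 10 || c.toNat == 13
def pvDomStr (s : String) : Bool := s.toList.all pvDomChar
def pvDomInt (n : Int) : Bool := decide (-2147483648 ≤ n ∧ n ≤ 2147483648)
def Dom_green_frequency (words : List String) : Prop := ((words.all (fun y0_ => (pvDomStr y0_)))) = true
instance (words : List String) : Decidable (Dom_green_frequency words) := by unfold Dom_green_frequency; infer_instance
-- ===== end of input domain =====

-- B replaces the per-column Counters by direct pairwise same-position comparison (alternative algorithm; not faster).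

-- word[i] under Pre_ is always in range; the default is never used there
def pvCharAt (w : String) (i : Nat) : Char := (PySem.Str.pyGet? w (i : Int)).getD ' '

-- ===== PORT A =====
def green_frequency (words : List String) : List (String × Int) :=
  let wordLen := (words.headD "").toList.length
  let scores0 : PySem.Dict String Int :=
    words.foldl (fun d w => d.insert w 0) PySem.Dict.empty
  let scores :=
    (List.range wordLen).foldl (fun scores i =>
      let columnCounts : PySem.Dict Char Int :=
        PySem.Dict.counter (words.map (fun w => pvCharAt w i))
      words.foldl (fun s w =>
        s.modify w 0 (fun v => v + (columnCounts.getD (pvCharAt w i) 0 - 1))) scores) scores0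
  scores.items

-- ===== PORT B =====
def green_frequency_alt (words : List String) : List (String × Int) :=
  let wordLen := (words.headD "").toList.length
  let scores : PySem.Dict String Int :=
    words.foldl (fun s w =>
      let mm := (words.map (fun v =>
        ((List.range wordLen).map
          (fun i => if pvCharAt v i = pvCharAt w i then (1 : Int) else 0)).sum)).sum
      s.insert w (s.getD w 0 + mm - (wordLen : Int))) PySem.Dict.empty
  scores.items

-- ===== PRECONDITION & SPEC =====
-- Pre_ excludes exactly the inputs where A raises: the empty list (IndexError on words[0])
-- and lists containing a word shorter than words[0] (IndexError on word[i]).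
def Pre_green_frequency (words : List String) : Prop :=
  words ≠ [] ∧ ∀ w ∈ words, (words.headD "").toList.length ≤ w.toList.length
instance (words : List String) : Decidable (Pre_green_frequency words) := by
  unfold Pre_green_frequency; infer_instance
def pvWitness_green_frequency : List String := ["crane", "slate", "crane"]
def Spec_green_frequency (words : List String) (out : List (String × Int)) : Prop := out = green_frequency_alt words
instance (words : List String) (out : List (String × Int)) : Decidable (Spec_green_frequency words out) := by unfold Spec_green_frequency; infer_instance

-- ===== CLAIM (what is proved, stated in full; the proofs are below) =====
def Claim_equal_green_frequency : Prop := ∀ (words : List String), Dom_green_frequency words → Pre_green_frequency words → Spec_green_frequency words (green_frequency words)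

-- ===== LEMMAS AND PROOFS =====

-- value of B's insert-accumulate loop at a key
theorem pv_getD_foldl_insert_add {α : Type} [DecidableEq α] (f : α → Int) (l : List α)
    (d : PySem.Dict α Int) (x : α) :
    (l.foldl (fun s w => s.insert w (s.getD w 0 + f w)) d).getD x 0
      = d.getD x 0 + (l.count x : Int) * f x := by
  induction l generalizing d with
  | nil => simp
  | cons y l ih =>
    simp only [List.foldl_cons, ih, PySem.Dict.getD_insert, List.count_cons]
    by_cases h : x = y
    · subst h; simp; ring
    · simp [h, Ne.symm h]

-- the zero-initialisation loop leaves every value 0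
theorem pv_getD_foldl_insert_zero {α : Type} [DecidableEq α] (l : List α) (d : PySem.Dict α Int)
    (hd : ∀ k, d.getD k 0 = 0) (x : α) :
    (l.foldl (fun d w => d.insert w (0 : Int)) d).getD x 0 = 0 := by
  induction l generalizing d with
  | nil => exact hd x
  | cons y l ih =>
    refine ih _ (fun k => ?_)
    rw [PySem.Dict.getD_insert]
    split
    · rfl
    · exact hd k

-- value of A's inner modify loop at a key
theorem pv_getD_foldl_modify_add {α : Type} [DecidableEq α] (f : α → Int) (l : List α)
    (d : PySem.Dict α Int) (x : α) :
    (l.foldl (fun s w => s.modify w 0 (fun v => v + f w)) d).getD x 0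
      = d.getD x 0 + (l.count x : Int) * f x := by
  induction l generalizing d with
  | nil => simp
  | cons y l ih =>
    simp only [List.foldl_cons, ih, PySem.Dict.getD_modify, List.count_cons]
    by_cases h : x = y
    · subst h; simp; ring
    · simp [h, Ne.symm h]

-- keys of A's inner modify loop
theorem pv_keys_foldl_modify_self {α : Type} [DecidableEq α] (f : α → Int) (l : List α)
    (d : PySem.Dict α Int) (h : ∀ w ∈ l, w ∈ d.keys) :
    (l.foldl (fun s w => s.modify w 0 (fun v => v + f w)) d).keys = d.keys := by
  rw [PySem.Dict.keys_foldl_modify, PySem.Set.update_eq_append_filter,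
    List.append_right_eq_self, List.filter_eq_nil_iff]
  intro a ha
  simp
  exact h a ((PySem.Set.mem_ofList _ _).1 ha)

-- value of A's whole double loop at a key
theorem pv_getD_outer (words : List String) (δ : Nat → String → Int) (L : List Nat)
    (d : PySem.Dict String Int) (x : String) :
    (L.foldl (fun scores i =>
        words.foldl (fun s w => s.modify w 0 (fun v => v + δ i w)) scores) d).getD x 0
      = d.getD x 0 + (words.count x : Int) * (L.map (fun i => δ i x)).sum := by
  induction L generalizing d with
  | nil => simp
  | cons i L ih =>
    simp only [List.foldl_cons, ih, pv_getD_foldl_modify_add, List.map_cons, List.sum_cons]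
    ring

-- keys of A's whole double loop
theorem pv_keys_outer (words : List String) (δ : Nat → String → Int) (L : List Nat)
    (d : PySem.Dict String Int) (h : ∀ w ∈ words, w ∈ d.keys) :
    (L.foldl (fun scores i =>
        words.foldl (fun s w => s.modify w 0 (fun v => v + δ i w)) scores) d).keys = d.keys := by
  induction L generalizing d with
  | nil => rfl
  | cons i L ih =>
    rw [List.foldl_cons, ih, pv_keys_foldl_modify_self]
    · exact h
    · intro w hw; rw [pv_keys_foldl_modify_self _ _ _ h]; exact h w hw

-- keys of the zero-initialisation / of B's loop: first occurrences of words
theorem pv_keys_foldl_insert_words {α : Type} [DecidableEq α] (g : PySem.Dict α Int → α → Int)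
    (words : List α) :
    (words.foldl (fun d w => d.insert w (g d w)) PySem.Dict.empty).keys
      = PySem.Set.ofList words := by
  rw [PySem.Dict.keys_foldl_insert]
  simp [PySem.Set.update_nil_left, PySem.Dict.keys_empty]

-- exchange of the two summations (column-major ↔ word-major)
theorem pv_sum_swap {α β : Type} (l1 : List α) (l2 : List β) (f : α → β → Int) :
    (l1.map (fun a => (l2.map (f a)).sum)).sum
      = (l2.map (fun b => (l1.map (fun a => f a b)).sum)).sum := by
  induction l1 with
  | nil => simp
  | cons a l1 ih =>
    simp only [List.map_cons, List.sum_cons, ih]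
    rw [← PySem.List.sum_map_add_int]

-- the pointwise identity: A's per-column contributions at x sum to B's pairwise match count
theorem pv_delta_sum (words : List String) (wl : Nat) (x : String) :
    ((List.range wl).map (fun i =>
        (PySem.Dict.counter (words.map (fun w => pvCharAt w i))).getD (pvCharAt x i) 0 - 1)).sum
      = (words.map (fun v =>
          ((List.range wl).map
            (fun i => if pvCharAt v i = pvCharAt x i then (1 : Int) else 0)).sum)).sum
        - (wl : Int) := by
  rw [← pv_sum_swap]
  have h1 : ∀ i : Nat,
      (PySem.Dict.counter (words.map (fun w => pvCharAt w i))).getD (pvCharAt x i) 0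
        = (words.map (fun v => if pvCharAt v i = pvCharAt x i then (1 : Int) else 0)).sum := by
    intro i
    rw [PySem.Dict.getD_counter]
    have h := PySem.List.sum_map_ite_one_zero (fun v => pvCharAt v i == pvCharAt x i) words
    simp only [beq_iff_eq] at h
    rw [h]
    simp [List.count, List.countP_map]
    rfl
  calc ((List.range wl).map (fun i =>
        (PySem.Dict.counter (words.map (fun w => pvCharAt w i))).getD (pvCharAt x i) 0 - 1)).sum
      = ((List.range wl).map (fun i =>
        (words.map (fun v => if pvCharAt v i = pvCharAt x i then (1 : Int) else 0)).sum + (-1))).sum := by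
        refine congrArg List.sum (List.map_congr_left fun i _ => ?_)
        rw [h1 i]; ring
    _ = _ := by
        rw [PySem.List.sum_map_add_int, PySem.List.sum_map_const_int]
        simp [sub_eq_add_neg]

theorem green_frequency_eq_alt (words : List String) :
    green_frequency words = green_frequency_alt words := by
  unfold green_frequency green_frequency_alt
  set wl := (words.headD "").toList.length with hwl
  set δ : Nat → String → Int := fun i w =>
    (PySem.Dict.counter (words.map (fun w => pvCharAt w i))).getD (pvCharAt w i) 0 - 1 with hδ
  set f : String → Int := fun w =>
    (words.map (fun v =>
      ((List.range wl).map
        (fun i => if pvCharAt v i = pvCharAt w i then (1 : Int) else 0)).sum)).sum - (wl : Int)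
    with hf
  set dA := (List.range wl).foldl (fun scores i =>
      words.foldl (fun s w => s.modify w 0 (fun v => v + δ i w)) scores)
      (words.foldl (fun d w => d.insert w (0 : Int)) PySem.Dict.empty) with hdA
  set dB := words.foldl (fun s w => s.insert w (s.getD w 0 + f w)) PySem.Dict.empty with hdB
  have hshape : dB = words.foldl (fun s w =>
      s.insert w (s.getD w 0
        + (words.map (fun v =>
            ((List.range wl).map
              (fun i => if pvCharAt v i = pvCharAt w i then (1 : Int) else 0)).sum)).sum
        - (wl : Int))) PySem.Dict.empty := by
    rw [hdB]
    refine congrArg (fun g => List.foldl g PySem.Dict.empty words) ?_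
    funext s w
    rw [hf]; ring_nf
  show dA.items = (words.foldl _ PySem.Dict.empty).items
  rw [← hshape]
  have hk0 : (words.foldl (fun d w => d.insert w (0 : Int)) PySem.Dict.empty).keys
      = PySem.Set.ofList words := pv_keys_foldl_insert_words (fun _ _ => 0) words
  have hkA : dA.keys = PySem.Set.ofList words := by
    rw [hdA, pv_keys_outer]
    · exact hk0
    · intro w hw; rw [hk0]; exact (PySem.Set.mem_ofList _ _).2 hw
  have hkB : dB.keys = PySem.Set.ofList words := by
    rw [hdB]; exact pv_keys_foldl_insert_words _ words
  have hnA : dA.keys.Nodup := by rw [hkA]; exact PySem.Set.nodup_ofList words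
  have hnB : dB.keys.Nodup := by rw [hkB]; exact PySem.Set.nodup_ofList words
  rw [PySem.Dict.items_eq_map_keys dA hnA 0, PySem.Dict.items_eq_map_keys dB hnB 0, hkA, hkB]
  apply List.map_congr_left
  intro x hx
  have hA : dA.getD x 0 = (words.count x : Int) * ((List.range wl).map (fun i => δ i x)).sum := by
    rw [hdA, pv_getD_outer,
      pv_getD_foldl_insert_zero words PySem.Dict.empty (fun k => by simp) x]
    simp
  have hB : dB.getD x 0 = (words.count x : Int) * f x := by
    rw [hdB, pv_getD_foldl_insert_add]
    simp
  rw [hA, hB, hf]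
  simp only [hδ]
  rw [pv_delta_sum words wl x]

-- ===== VERDICT (by name: the statement is the Claim_ definition above) =====
theorem green_frequency_spec : Claim_equal_green_frequency := by
  intro words _ _
  unfold Spec_green_frequency
  exact green_frequency_eq_alt words
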